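-- pv_equiv track=rewrite | github.com/GitAronas/Portfolio-Projects-Intermediate | RSA Cipher/PrimeNumber.py | sqrRootBounds
-- ===== SOURCE A (Python) =====
-- def sqrRootBounds(num: int) -> tuple[int, int]:
--     if num <= 1: return num, num + 1
--
--     l = 0
--     h = num
--
--     while h - l > 1:
--         m = (l + h) // 2
--         m2 = m * m
--
--         if m2 > num:
--             h = m
--         elif m2 == num:
--             l = m
--             h = l + 1
--             break
--         elif m2 < num:
--             l = m
--
--     return l, h
-- ===== SOURCE B (Python) =====
-- def sqrRootBounds(num: int) -> tuple[int, int]: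
--     if num <= 1: return num, num + 1
--     x = num
--     y = (x + 1) // 2
--     while y < x:
--         x = y
--         y = (x + num // x) // 2
--     return x, x + 1
-- ===== Notes on version B (the rewrite author's own statement) =====
-- stated objective: alternative
-- what changed: Replaces the linear-range bisection loop with a hand-written Newton (Heron) iteration for the integer square root; both keep A's early guard for small inputs verbatim and otherwise return the floor square root r paired with r+1.
import Mathlib
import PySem

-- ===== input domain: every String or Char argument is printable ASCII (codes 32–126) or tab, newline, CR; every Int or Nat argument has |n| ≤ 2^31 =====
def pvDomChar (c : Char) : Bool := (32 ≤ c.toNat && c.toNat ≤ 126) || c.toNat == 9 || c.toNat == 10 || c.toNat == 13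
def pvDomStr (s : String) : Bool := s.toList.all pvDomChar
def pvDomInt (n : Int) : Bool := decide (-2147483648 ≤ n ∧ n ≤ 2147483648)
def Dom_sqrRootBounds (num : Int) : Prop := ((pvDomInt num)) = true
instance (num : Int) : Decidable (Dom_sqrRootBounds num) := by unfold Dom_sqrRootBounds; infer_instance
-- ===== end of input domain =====

-- B replaces A's bisection over [0, num] with a hand-written Newton (Heron) iteration for the
-- integer square root (objective: alternative — a different exact algorithm of similar cost).

-- ===== PORT A =====
-- the while loop of A; the final `elif m2 < num` is the exhaustive remaining case
def pvBsLoop (num l h : Int) : Int × Int :=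
  if h - l > 1 then
    let m := PySem.Int.floordiv (l + h) 2
    let m2 := m * m
    if m2 > num then pvBsLoop num l m
    else if m2 = num then (m, m + 1)
    else pvBsLoop num m h
  else (l, h)
termination_by (h - l).toNat
decreasing_by
  all_goals simp only [PySem.Int.floordiv_eq_ediv_of_pos (by norm_num : (0:Int) < 2)] at *; omega

def sqrRootBounds (num : Int) : Int × Int :=
  if num ≤ 1 then (num, num + 1)
  else pvBsLoop num 0 num

-- ===== PORT B =====
-- the while loop of B; the `0 < y` test only makes the recursion total: every call reached
-- from sqrRootBounds_alt (num ≥ 2) has 1 ≤ y, exactly as B's Python loop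
def pvNewtonLoop (num x y : Int) : Int :=
  if y < x then
    if 0 < y then
      pvNewtonLoop num y (PySem.Int.floordiv (y + PySem.Int.floordiv num y) 2)
    else x
  else x
termination_by x.toNat
decreasing_by omega

def sqrRootBounds_alt (num : Int) : Int × Int :=
  if num ≤ 1 then (num, num + 1)
  else
    let x := num
    let y := PySem.Int.floordiv (x + 1) 2
    let r := pvNewtonLoop num x y
    (r, r + 1)

-- ===== PRECONDITION & SPEC =====
def Spec_sqrRootBounds (num : Int) (out : Int × Int) : Prop := out = sqrRootBounds_alt num
instance (num : Int) (out : Int × Int) : Decidable (Spec_sqrRootBounds num out) := by unfold Spec_sqrRootBounds; infer_instance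

-- ===== CLAIM (what is proved, stated in full; the proofs are below) =====
def Claim_equal_sqrRootBounds : Prop := ∀ (num : Int), Dom_sqrRootBounds num → Spec_sqrRootBounds num (sqrRootBounds num)

-- ===== LEMMAS AND PROOFS =====

-- A's loop lands on the integer square root
theorem pvBsLoop_eq (num l h : Int) :
    0 ≤ l → l < h → l*l ≤ num → num < h*h →
    ∃ r, pvBsLoop num l h = (r, r + 1) ∧ 0 ≤ r ∧ r*r ≤ num ∧ num < (r+1)*(r+1) := by
  induction l, h using pvBsLoop.induct (num := num) with
  | case1 l h hc m m2 hgt ih =>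
    intro h0 hlh h1 h2
    rw [pvBsLoop, if_pos hc, if_pos hgt]
    have hm2 : l < PySem.Int.floordiv (l + h) 2 ∧ PySem.Int.floordiv (l + h) 2 < h := by
      simp only [PySem.Int.floordiv_eq_ediv_of_pos (by norm_num : (0:Int) < 2)]; omega
    exact ih h0 hm2.1 h1 hgt
  | case2 l h hc m m2 hgt heq =>
    intro h0 hlh h1 h2
    rw [pvBsLoop, if_pos hc, if_neg hgt, if_pos heq]
    have hm : l ≤ PySem.Int.floordiv (l + h) 2 ∧ PySem.Int.floordiv (l + h) 2 ≤ h :=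
      PySem.Int.floordiv_two_mid_bounds (le_of_lt hlh)
    refine ⟨_, rfl, le_trans h0 hm.1, le_of_eq heq, ?_⟩
    have hm0 : 0 ≤ PySem.Int.floordiv (l + h) 2 := le_trans h0 hm.1
    nlinarith
  | case3 l h hc m m2 hgt heq ih =>
    intro h0 hlh h1 h2
    rw [pvBsLoop, if_pos hc, if_neg hgt, if_neg heq]
    have hd : m = PySem.Int.floordiv (l + h) 2 := rfl
    have hlt : m * m < num := by omega
    have hm2 : l < m ∧ m < h := by
      rw [hd]
      simp only [PySem.Int.floordiv_eq_ediv_of_pos (by norm_num : (0:Int) < 2)]; omega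
    exact ih (le_trans h0 (le_of_lt hm2.1)) hm2.2 (le_of_lt hlt) h2
  | case4 l h hc =>
    intro h0 hlh h1 h2
    rw [pvBsLoop, if_neg hc]
    have hh : h = l + 1 := by omega
    exact ⟨l, by rw [hh], h0, h1, by rw [← hh]; exact h2⟩

-- one Newton step never drops below the integer square root (AM–GM, floored)
theorem pv_newton_step_ge (num x s : Int) (hx : 0 < x) (_hs0 : 0 ≤ s) (hss : s*s ≤ num) :
    s ≤ PySem.Int.floordiv (x + PySem.Int.floordiv num x) 2 := by
  rw [PySem.Int.le_floordiv_iff_mul_le (by norm_num : (0:Int) < 2)]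
  have key : 2*s - x ≤ PySem.Int.floordiv num x := by
    rw [PySem.Int.le_floordiv_iff_mul_le hx]
    nlinarith [sq_nonneg (x - s)]
  linarith

-- B's loop, entered with y = ⌊(x + num//x)/2⌋ and x at least the integer square root s, returns s
theorem pvNewtonLoop_eq (num x y s : Int) (hs1 : 1 ≤ s) (hss : s*s ≤ num) (hs2 : num < (s+1)*(s+1)) :
    s ≤ x → y = PySem.Int.floordiv (x + PySem.Int.floordiv num x) 2 →
    pvNewtonLoop num x y = s := by
  induction x, y using pvNewtonLoop.induct (num := num) with
  | case1 x y hlt hpos ih =>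
    intro hsx hy
    rw [pvNewtonLoop, if_pos hlt, if_pos hpos]
    have hsy : s ≤ y := hy ▸ pv_newton_step_ge num x s (by omega) (by omega) hss
    exact ih hsy rfl
  | case2 x y hlt hpos =>
    intro hsx hy
    exfalso
    have hsy : s ≤ y := hy ▸ pv_newton_step_ge num x s (by omega) (by omega) hss
    omega
  | case3 x y hge =>
    intro hsx hy
    rw [pvNewtonLoop, if_neg hge]
    by_contra hne
    have hlt : s < x := lt_of_le_of_ne hsx (fun h => hne h.symm)
    have hx : 0 < x := by omega
    have hnum : num < x * x := by nlinarith
    have hdiv : PySem.Int.floordiv num x < x := by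
      rw [PySem.Int.floordiv_lt_iff_lt_mul hx]; exact hnum
    have : y < x := by
      rw [hy, PySem.Int.floordiv_lt_iff_lt_mul (by norm_num : (0:Int) < 2)]
      omega
    omega

-- ===== VERDICT (by name: the statement is the Claim_ definition above) =====
theorem sqrRootBounds_spec : Claim_equal_sqrRootBounds := by
  intro num _
  unfold Spec_sqrRootBounds sqrRootBounds sqrRootBounds_alt
  by_cases hle : num ≤ 1
  · simp [hle]
  · rw [if_neg hle, if_neg hle]
    have h2 : 2 ≤ num := by omega
    obtain ⟨r, hr, hr0, hr1, hr2⟩ := pvBsLoop_eq num 0 num (le_refl 0) (by omega)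
      (by nlinarith) (by nlinarith)
    have hr1' : 1 ≤ r := by
      by_contra hc
      have hr00 : r = 0 := by omega
      rw [hr00] at hr2; norm_num at hr2; omega
    have hrnum : r ≤ num := by nlinarith
    have hself : PySem.Int.floordiv num num = 1 := by
      rw [PySem.Int.floordiv_eq_iff_of_pos (by omega)]
      constructor <;> nlinarith
    have hn : pvNewtonLoop num num (PySem.Int.floordiv (num + 1) 2) = r := by
      apply pvNewtonLoop_eq num num _ r hr1' hr1 hr2 hrnum
      rw [hself]
    rw [hr]
    show (r, r + 1) = (pvNewtonLoop num num (PySem.Int.floordiv (num + 1) 2),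
      pvNewtonLoop num num (PySem.Int.floordiv (num + 1) 2) + 1)
    rw [hn]
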